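-- pv_equiv track=rewrite | github.com/cardel/Cursos | Semestres/10.Agosto-Diciembre 2021/FADAUSB/20-Agosto/1.Programa3.py | programa3
-- ===== SOURCE A (Python) =====
-- def programa3(n):
-- 	i = 1
-- 	cnt = 1
-- 	while i<=n:
-- 		cnt += 1 #Entrada
-- 		k = i
-- 		cnt += 1
-- 		while k<=n:
-- 			cnt +=1 #Entrada al ciclo interno
-- 			k+=1
-- 			cnt +=1
--
-- 		cnt +=1 # Salida del ciclo interno
-- 		k = 1
-- 		cnt +=1
-- 		while k<=i:
-- 			cnt +=1 #Entrada al ciclo interno 2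
-- 			k+=1
-- 			cnt +=1
-- 		cnt +=1 # Salida del ciclo interno 2
-- 		i+=1
-- 		cnt +=1
-- 	cnt+=1 #Salida del ciclo externo
--
-- 	return cnt
-- ===== SOURCE B (Python) =====
-- def programa3(n):
--     # Each outer iteration adds exactly 2*(n-i+1) + 2*i + 6 = 2*n + 8 to cnt,
--     # independent of i, so the whole count is a closed-form polynomial.
--     m = n if n > 0 else 0
--     return 2 * m * m + 8 * m + 2
-- ===== Notes on version B (the rewrite author's own statement) =====
-- stated objective: faster
-- what changed: Replaced the nested counting loops by a closed-form quadratic polynomial in max(n,0), derived by summing the per-iteration increments (each outer iteration adds a constant amount).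
import Mathlib
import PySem

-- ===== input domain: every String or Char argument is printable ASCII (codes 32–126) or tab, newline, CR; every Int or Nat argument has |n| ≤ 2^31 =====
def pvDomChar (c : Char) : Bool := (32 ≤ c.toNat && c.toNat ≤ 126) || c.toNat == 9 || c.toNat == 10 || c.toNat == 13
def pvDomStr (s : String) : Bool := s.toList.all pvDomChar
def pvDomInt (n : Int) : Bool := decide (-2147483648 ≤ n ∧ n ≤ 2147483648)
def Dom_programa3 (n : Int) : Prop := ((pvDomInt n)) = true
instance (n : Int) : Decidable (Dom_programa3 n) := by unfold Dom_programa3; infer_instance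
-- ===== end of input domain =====

-- B replaces A's nested counting loops by a closed-form quadratic polynomial in max(n,0) (constant-time instead of quadratic).

-- ===== PORT A =====
-- The while loops are ported with a Nat fuel that exactly covers the remaining iterations
-- ((bound+1-k).toNat), so each guard `k ≤ n` fires exactly as in Python.

-- inner while k<=n: cnt+=1; k+=1; cnt+=1
def pvLoop1 (fuel : Nat) (n k cnt : Int) : Int × Int :=
  match fuel with
  | 0 => (k, cnt)
  | f + 1 => if k ≤ n then pvLoop1 f n (k + 1) (cnt + 1 + 1) else (k, cnt)

-- inner while k<=i: cnt+=1; k+=1; cnt+=1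
def pvLoop2 (fuel : Nat) (i k cnt : Int) : Int × Int :=
  match fuel with
  | 0 => (k, cnt)
  | f + 1 => if k ≤ i then pvLoop2 f i (k + 1) (cnt + 1 + 1) else (k, cnt)

-- outer while i<=n
def pvOuter (fuel : Nat) (n i cnt : Int) : Int :=
  match fuel with
  | 0 => cnt
  | f + 1 =>
    if i ≤ n then
      let cnt := cnt + 1
      let k := i
      let cnt := cnt + 1
      let cnt := (pvLoop1 (n + 1 - k).toNat n k cnt).2
      let cnt := cnt + 1
      let k := (1 : Int)
      let cnt := cnt + 1
      let cnt := (pvLoop2 (i + 1 - k).toNat i k cnt).2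
      let cnt := cnt + 1
      pvOuter f n (i + 1) (cnt + 1)
    else cnt

def programa3 (n : Int) : Int := pvOuter (n + 1 - 1).toNat n 1 1 + 1

-- ===== PORT B =====
def programa3_alt (n : Int) : Int :=
  let m := if n > 0 then n else 0
  2 * m * m + 8 * m + 2

-- ===== PRECONDITION & SPEC =====
def Spec_programa3 (n : Int) (out : Int) : Prop := out = programa3_alt n
instance (n : Int) (out : Int) : Decidable (Spec_programa3 n out) := by unfold Spec_programa3; infer_instance

-- ===== CLAIM (what is proved, stated in full; the proofs are below) =====
def Claim_equal_programa3 : Prop := ∀ (n : Int), Dom_programa3 n → Spec_programa3 n (programa3 n)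

-- ===== LEMMAS AND PROOFS =====
theorem pvLoop1_snd (f : Nat) (n k cnt : Int) (hf : (n + 1 - k).toNat = f) :
    (pvLoop1 f n k cnt).2 = cnt + 2 * max (n + 1 - k) 0 := by
  induction f generalizing k cnt with
  | zero => simp [pvLoop1]; omega
  | succ f ih =>
    have h : k ≤ n := by omega
    rw [pvLoop1, if_pos h, ih (k + 1) _ (by omega)]
    omega

theorem pvLoop2_snd (f : Nat) (i k cnt : Int) (hf : (i + 1 - k).toNat = f) :
    (pvLoop2 f i k cnt).2 = cnt + 2 * max (i + 1 - k) 0 := by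
  induction f generalizing k cnt with
  | zero => simp [pvLoop2]; omega
  | succ f ih =>
    have h : k ≤ i := by omega
    rw [pvLoop2, if_pos h, ih (k + 1) _ (by omega)]
    omega

theorem pvOuter_eq (f : Nat) (n i cnt : Int) (hf : (n + 1 - i).toNat = f) (hi : 1 ≤ i) :
    pvOuter f n i cnt = cnt + max (n + 1 - i) 0 * (2 * n + 8) := by
  induction f generalizing i cnt with
  | zero =>
    have e : max (n + 1 - i) 0 = 0 := by omega
    rw [pvOuter, e]; ring
  | succ f ih =>
    have h : i ≤ n := by omega
    rw [pvOuter, if_pos h]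
    simp only [pvLoop1_snd _ n i _ rfl, pvLoop2_snd _ i 1 _ rfl]
    rw [ih (i + 1) _ (by omega) (by omega)]
    have e1 : max (n + 1 - i) 0 = n + 1 - i := by omega
    have e2 : max (i + 1 - 1) 0 = i := by omega
    have e3 : max (n + 1 - (i + 1)) 0 = n - i := by omega
    rw [e1, e2, e3]; ring

-- ===== VERDICT (by name: the statement is the Claim_ definition above) =====
theorem programa3_spec : Claim_equal_programa3 := by
  intro n _
  unfold Spec_programa3 programa3 programa3_alt
  rw [pvOuter_eq (n + 1 - 1).toNat n 1 1 rfl le_rfl]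
  rcases le_or_gt n 0 with h | h
  · have e : max (n + 1 - 1) 0 = 0 := by omega
    rw [e, if_neg (not_lt.mpr h)]; ring
  · have e : max (n + 1 - 1) 0 = n := by omega
    rw [e, if_pos h]; ring
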